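-- pv_equiv track=rewrite | github.com/UTokyo-HayashiLab/subregular_language | train_morphology.py | subseqs_upto_m
-- ===== SOURCE A (Python) =====
-- from typing import List, Tuple
--
-- def subseqs_upto_m(seq: List[str], m: int):
--     S=set()
--     n=len(seq)
--     for L in range(1, m+1):
--         def rec(start, l, pref):
--             if l==0:
--                 S.add(tuple(pref)); return
--             for i in range(start, n-l+1):
--                 pref.append(seq[i]); rec(i+1, l-1, pref); pref.pop()
--         rec(0, L, [])
--     return S
-- ===== SOURCE B (Python) =====
-- def combos(k, xs):
--     # all length-k combinations of xs, in lexicographic index order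
--     if k == 0:
--         return [()]
--     if not xs:
--         return []
--     head = xs[0]
--     rest = xs[1:]
--     return [(head,) + t for t in combos(k - 1, rest)] + combos(k, rest)
--
-- def subseqs_upto_m(seq, m):
--     S = set()
--     for L in range(1, min(m, len(seq)) + 1):
--         for t in combos(L, seq):
--             S.add(t)
--     return S
-- ===== Notes on version B (the rewrite author's own statement) =====
-- stated objective: alternative
-- what changed: Replaces the inner index-based recursive helper with a shared mutable prefix (append/recurse/pop into a closed-over set) by a self-contained structural-recursive combos(k, xs) on head/tail that builds each length-L combination list functionally and feeds it into the set.
import Mathlib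
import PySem

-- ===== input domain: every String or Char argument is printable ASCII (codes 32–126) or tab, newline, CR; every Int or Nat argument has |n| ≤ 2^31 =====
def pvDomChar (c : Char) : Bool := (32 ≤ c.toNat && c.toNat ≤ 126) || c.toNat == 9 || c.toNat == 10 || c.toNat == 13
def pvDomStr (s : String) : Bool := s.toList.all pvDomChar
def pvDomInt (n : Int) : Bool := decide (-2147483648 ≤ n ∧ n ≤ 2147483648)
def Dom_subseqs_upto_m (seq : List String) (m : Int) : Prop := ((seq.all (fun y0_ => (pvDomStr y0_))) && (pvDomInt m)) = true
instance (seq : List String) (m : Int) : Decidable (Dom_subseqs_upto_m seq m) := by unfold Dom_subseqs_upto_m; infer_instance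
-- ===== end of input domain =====

-- B replaces A's index recursion with a mutable shared prefix by a per-length
-- structural-recursive `combos` building combination lists functionally (same values, alternative decomposition).

-- ===== PORT A =====
-- rec(start, l, pref): the inner recursive helper; the Python int l is carried as a Nat
-- (it only takes values L, L-1, …, 0), structural recursion on it; seq[i] is in range on
-- every call the loop makes, so pyGetD with a default is exact here.
def recA (seq : List String) (n : Int) (start : Int) (l : Nat) (pref : List String)
    (S : PySem.Set (List String)) : PySem.Set (List String) :=
  match l with
  | 0 => S.add pref
  | Nat.succ l' =>
    (PySem.List.pyRange start (n - ((l' : Int) + 1) + 1) 1).foldl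
      (fun s i => recA seq n (i + 1) l' (pref ++ [PySem.List.pyGetD seq i ""]) s) S

def subseqs_upto_m (seq : List String) (m : Int) : List (List String) :=
  (PySem.List.pyRange 1 (m + 1) 1).foldl
    (fun S L => recA seq (seq.length : Int) 0 L.toNat [] S) PySem.Set.empty

-- ===== PORT B =====
-- combos k xs = all length-k combinations of xs, lexicographic index order (Source B's combos)
def combos : Nat → List String → List (List String)
  | 0, _ => [[]]
  | Nat.succ _, [] => []
  | Nat.succ k, x :: xs => (combos k xs).map (fun t => x :: t) ++ combos (k + 1) xs

def subseqs_upto_m_alt (seq : List String) (m : Int) : List (List String) :=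
  (PySem.List.pyRange 1 (min m (seq.length : Int) + 1) 1).foldl
    (fun S L => (combos L.toNat seq).foldl PySem.Set.add S) PySem.Set.empty

-- ===== PRECONDITION & SPEC =====
def Spec_subseqs_upto_m (seq : List String) (m : Int) (out : List (List String)) : Prop := out = subseqs_upto_m_alt seq m
instance (seq : List String) (m : Int) (out : List (List String)) : Decidable (Spec_subseqs_upto_m seq m out) := by unfold Spec_subseqs_upto_m; infer_instance

-- ===== CLAIM (what is proved, stated in full; the proofs are below) =====
def Claim_equal_subseqs_upto_m : Prop := ∀ (seq : List String) (m : Int), Dom_subseqs_upto_m seq m → Spec_subseqs_upto_m seq m (subseqs_upto_m seq m)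

-- ===== LEMMAS AND PROOFS =====

theorem combos_of_short' : ∀ (xs : List String) (k : Nat), xs.length < k → combos k xs = [] := by
  intro xs
  induction xs with
  | nil => intro k h; cases k with | zero => omega | succ k => rfl
  | cons x xs ih =>
    intro k h
    cases k with
    | zero => omega
    | succ k =>
      simp only [List.length_cons] at h
      simp only [combos]
      rw [ih k (by omega), ih (k + 1) (by omega)]
      rfl

theorem combos_of_short (k : Nat) (xs : List String) (h : xs.length < k) : combos k xs = [] :=
  combos_of_short' xs k h

theorem recA_succ_aux (seq : List String) (l : Nat)
    (IH : ∀ (start : Int) (pref : List String) (S : PySem.Set (List String)),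
      0 ≤ start → start ≤ (seq.length : Int) →
      recA seq (seq.length : Int) start l pref S
        = (combos l (seq.drop start.toNat)).foldl (fun s c => s.add (pref ++ c)) S) :
    ∀ (k : Nat) (start : Int) (pref : List String) (S : PySem.Set (List String)),
      0 ≤ start → start ≤ (seq.length : Int) → ((seq.length : Int) - start).toNat ≤ k →
      recA seq (seq.length : Int) start (l + 1) pref S
        = (combos (l + 1) (seq.drop start.toNat)).foldl (fun s c => s.add (pref ++ c)) S := by
  intro k
  induction k with
  | zero =>
    intro start pref S h0 hn hk
    -- start = seq.length, so the loop range is empty and no combination of length l+1 exists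
    have hs : start = (seq.length : Int) := by omega
    simp only [recA]
    rw [PySem.List.pyRange_one_eq_nil (by omega)]
    rw [combos_of_short (l + 1) (seq.drop start.toNat) (by simp [List.length_drop]; omega)]
    rfl
  | succ k ih =>
    intro start pref S h0 hn hk
    by_cases hlt : start < (seq.length : Int) - (l : Int)
    · -- loop range nonempty: first iteration start, rest is recA at start+1
      have hsn : start.toNat < seq.length := by omega
      have hcons : seq.drop start.toNat = seq[start.toNat] :: seq.drop (start.toNat + 1) :=
        List.drop_eq_getElem_cons hsn
      have hget : PySem.List.pyGetD seq start "" = seq[start.toNat] :=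
        PySem.List.pyGetD_eq_getElem seq "" h0 (by omega)
      -- unfold one step of the loop on the A side
      conv_lhs => rw [recA]
      rw [PySem.List.pyRange_one_cons (by omega)]
      simp only [List.foldl_cons]
      -- the remaining fold is recA at start+1 with level l+1
      have hrest :
          (PySem.List.pyRange (start + 1) ((seq.length : Int) - ((l : Int) + 1) + 1) 1).foldl
            (fun s i => recA seq (seq.length : Int) (i + 1) l (pref ++ [PySem.List.pyGetD seq i ""]) s)
            (recA seq (seq.length : Int) (start + 1) l (pref ++ [PySem.List.pyGetD seq start ""]) S)
          = recA seq (seq.length : Int) (start + 1) (l + 1) pref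
              (recA seq (seq.length : Int) (start + 1) l (pref ++ [PySem.List.pyGetD seq start ""]) S) := by
        rfl
      rw [hrest]
      rw [IH (start + 1) _ _ (by omega) (by omega)]
      rw [ih (start + 1) pref _ (by omega) (by omega) (by omega)]
      -- now the B side: split combos (l+1) on the cons
      rw [hcons]
      simp only [combos, List.foldl_append, List.foldl_map]
      have h1 : (Int.toNat (start + 1)) = start.toNat + 1 := by omega
      rw [h1, hget]
      have hfun : ∀ (s : PySem.Set (List String)) (c : List String),
          PySem.Set.add s (pref ++ [seq[start.toNat]] ++ c)
            = PySem.Set.add s (pref ++ seq[start.toNat] :: c) := by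
        intro s c
        simp
      simp only [hfun]
    · -- loop range empty and the dropped suffix is too short for l+1 elements
      simp only [recA]
      rw [PySem.List.pyRange_one_eq_nil (by omega)]
      rw [combos_of_short (l + 1) (seq.drop start.toNat) (by simp [List.length_drop]; omega)]
      rfl

theorem recA_eq (seq : List String) :
    ∀ (l : Nat) (start : Int) (pref : List String) (S : PySem.Set (List String)),
      0 ≤ start → start ≤ (seq.length : Int) →
      recA seq (seq.length : Int) start l pref S
        = (combos l (seq.drop start.toNat)).foldl (fun s c => s.add (pref ++ c)) S := by
  intro l
  induction l with
  | zero =>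
    intro start pref S _ _
    simp [recA, combos]
  | succ l ih =>
    intro start pref S h0 hn
    exact recA_succ_aux seq l ih ((seq.length : Int) - start).toNat start pref S h0 hn (le_refl _)

theorem recA_top (seq : List String) (S : PySem.Set (List String)) (L : Int) :
    recA seq (seq.length : Int) 0 L.toNat [] S = (combos L.toNat seq).foldl PySem.Set.add S := by
  rw [recA_eq seq L.toNat 0 [] S (le_refl 0) (by positivity)]
  simp

-- for every L beyond len(seq) the fold step is a no-op (no combinations of that length exist)
theorem foldl_combos_big (seq : List String) :
    ∀ (k : Nat) (a b : Int) (S : PySem.Set (List String)), (b - a).toNat ≤ k → (seq.length : Int) < a →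
      (PySem.List.pyRange a b 1).foldl (fun S L => (combos L.toNat seq).foldl PySem.Set.add S) S = S := by
  intro k
  induction k with
  | zero =>
    intro a b S hk ha
    rw [PySem.List.pyRange_one_eq_nil (by omega)]
    rfl
  | succ k ih =>
    intro a b S hk ha
    by_cases hab : a < b
    · rw [PySem.List.pyRange_one_cons hab, List.foldl_cons,
        combos_of_short a.toNat seq (by omega), List.foldl_nil]
      exact ih (a + 1) b S (by omega) (by omega)
    · rw [PySem.List.pyRange_one_eq_nil (by omega)]
      rfl

-- ===== VERDICT (by name: the statement is the Claim_ definition above) =====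
theorem subseqs_upto_m_spec : Claim_equal_subseqs_upto_m := by
  intro seq m _
  unfold Spec_subseqs_upto_m subseqs_upto_m subseqs_upto_m_alt
  simp only [recA_top]
  by_cases hm : m ≤ (seq.length : Int)
  · rw [min_eq_left hm]
  · rw [min_eq_right (by omega)]
    rw [PySem.List.pyRange_one_append 1 ((seq.length : Int) + 1) (m + 1) (by omega) (by omega),
      List.foldl_append]
    exact foldl_combos_big seq (m - seq.length).toNat _ _ _ (by omega) (by omega)
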